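-- pv_equiv track=rewrite | github.com/unvercan/improvement-on-motion-guided-siamese-object-tracking-networks-using-prioritized-windows | tests/dataset.py | rename_sequences_otb
-- ===== SOURCE A (Python) =====
-- def rename_sequences_otb(seq_names):
--     # in case some sequences may have multiple targets
--     renamed_seqs = []
--     for i, seq_name in enumerate(seq_names):
--         if seq_names.count(seq_name) == 1:
--             renamed_seqs.append(seq_name)
--         else:
--             ind = seq_names[:i + 1].count(seq_name)
--             renamed_seqs.append('%s.%d' % (seq_name, ind))
--
--     return renamed_seqs
-- ===== SOURCE B (Python) =====
-- def rename_sequences_otb(seq_names):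
--     # Group-and-scatter: build name -> ordered positions, copy the input,
--     # then overwrite only the positions of duplicated names with 'name.k'.
--     positions = {}
--     for i, name in enumerate(seq_names):
--         positions.setdefault(name, []).append(i)
--     result = list(seq_names)
--     for name, poss in positions.items():
--         if len(poss) > 1:
--             for k, pos in enumerate(poss, 1):
--                 result[pos] = '%s.%d' % (name, k)
--     return result
-- ===== Notes on version B (the rewrite author's own statement) =====
-- stated objective: faster
-- what changed: Replaces A's per-element full-list and prefix count() scans with a group-and-scatter pass: one pass groups each name's positions in a dict, the result starts as a copy of the input, and only duplicated names' positions are overwritten with their occurrence suffix.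
import Mathlib
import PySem

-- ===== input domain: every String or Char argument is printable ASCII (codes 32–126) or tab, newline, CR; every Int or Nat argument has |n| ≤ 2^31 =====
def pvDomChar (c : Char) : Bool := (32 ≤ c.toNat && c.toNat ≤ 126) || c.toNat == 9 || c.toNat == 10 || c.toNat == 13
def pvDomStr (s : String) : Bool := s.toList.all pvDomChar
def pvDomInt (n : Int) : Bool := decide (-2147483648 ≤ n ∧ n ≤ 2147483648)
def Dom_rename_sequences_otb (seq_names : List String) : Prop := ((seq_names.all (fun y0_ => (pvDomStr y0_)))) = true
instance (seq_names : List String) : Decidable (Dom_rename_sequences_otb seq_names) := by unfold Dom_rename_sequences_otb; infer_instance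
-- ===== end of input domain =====

-- B replaces A's per-element count() scans (O(n^2)) with a group-and-scatter pass: group each
-- name's positions in a dict, copy the input, overwrite only duplicated names' positions (O(n) dict ops).

-- ===== PORT A =====
def rename_sequences_otb (seq_names : List String) : List String :=
  (PySem.List.enumerate seq_names 0).foldl (fun renamed_seqs p =>
    if PySem.List.count seq_names p.2 = 1 then
      renamed_seqs ++ [p.2]
    else
      let ind := PySem.List.count (PySem.List.slice seq_names none (some (p.1 + 1))) p.2
      renamed_seqs ++ [p.2 ++ "." ++ PySem.Int.toStr (ind : Int)]) []

-- ===== PORT B =====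
-- positions.setdefault(name, []).append(i) is d.modify name [] (· ++ [i]);
-- result[pos] = … uses List.set pos.toNat — exact here: every stored pos is a nonnegative in-range index.
def rename_sequences_otb_alt (seq_names : List String) : List String :=
  let positions : PySem.Dict String (List Int) :=
    (PySem.List.enumerate seq_names 0).foldl
      (fun d p => d.modify p.2 [] (fun l => l ++ [p.1])) PySem.Dict.empty
  positions.items.foldl
    (fun result q =>
      if 1 < q.2.length then
        (PySem.List.enumerate q.2 1).foldl
          (fun r w => r.set w.2.toNat (q.1 ++ "." ++ PySem.Int.toStr w.1)) result
      else result)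
    seq_names

-- ===== PRECONDITION & SPEC =====
def Spec_rename_sequences_otb (seq_names : List String) (out : List String) : Prop := out = rename_sequences_otb_alt seq_names
instance (seq_names : List String) (out : List String) : Decidable (Spec_rename_sequences_otb seq_names out) := by unfold Spec_rename_sequences_otb; infer_instance

-- ===== CLAIM (what is proved, stated in full; the proofs are below) =====
def Claim_equal_rename_sequences_otb : Prop := ∀ (seq_names : List String), Dom_rename_sequences_otb seq_names → Spec_rename_sequences_otb seq_names (rename_sequences_otb seq_names)

-- ===== LEMMAS AND PROOFS =====

-- the intended i-th output element, common target of both ports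
def pvF (xs : List String) (i : Nat) : String :=
  if List.count (xs.getD i "") xs = 1 then xs.getD i ""
  else xs.getD i "" ++ "." ++ PySem.Int.toStr (((xs.take (i + 1)).count (xs.getD i "") : Nat) : Int)

-- A's per-element value, carrying the processed prefix p
def pvSpec (xs : List String) : List String → List String → List String
  | _, [] => []
  | p, s :: t =>
    (if List.count s xs = 1 then s
     else s ++ "." ++ PySem.Int.toStr ((List.count s p : Int) + 1)) :: pvSpec xs (p ++ [s]) t

theorem pvSlice_prefix (xs p l : List String) (s : String) (hxs : xs = p ++ s :: l) :
    PySem.List.slice xs none (some (((p ++ [s]).length : Nat) : Int)) = p ++ [s] := by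
  rw [PySem.List.slice_to_natCast, hxs]
  simp [List.take_append]

theorem pvTake_prefix (xs p l : List String) (s : String) (hxs : xs = p ++ s :: l) :
    xs.take (p.length + 1) = p ++ [s] := by
  have := pvSlice_prefix xs p l s hxs
  rw [PySem.List.slice_to_natCast] at this
  simpa using this

-- A's fold over the suffix (with absolute indices) produces pvSpec
theorem pvA (xs : List String) : ∀ (l p o : List String), xs = p ++ l →
    (PySem.List.enumerate l (p.length : Int)).foldl (fun renamed_seqs q =>
      if PySem.List.count xs q.2 = 1 then renamed_seqs ++ [q.2]
      else renamed_seqs ++ [q.2 ++ "." ++ PySem.Int.toStr ((PySem.List.count (PySem.List.slice xs none (some (q.1 + 1))) q.2 : Int))]) o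
    = o ++ pvSpec xs p l := by
  intro l
  induction l with
  | nil => intro p o _; simp [PySem.List.enumerate_nil, pvSpec]
  | cons s t ih =>
    intro p o hxs
    have hlen : (p.length : Int) + 1 = (((p ++ [s]).length : Nat) : Int) := by simp
    rw [PySem.List.enumerate_cons]
    simp only [List.foldl_cons]
    rw [hlen, ih (p ++ [s]) _ (by simpa using hxs)]
    have hval : (if PySem.List.count xs s = 1 then o ++ [s]
        else o ++ [s ++ "." ++ PySem.Int.toStr ((PySem.List.count (PySem.List.slice xs none (some (((p ++ [s]).length : Nat) : Int))) s : Int))])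
        = o ++ [if List.count s xs = 1 then s
            else s ++ "." ++ PySem.Int.toStr ((List.count s p : Int) + 1)] := by
      rw [pvSlice_prefix xs p t s hxs]
      by_cases h : List.count s xs = 1 <;> simp [PySem.List.count, h, List.count_append]
    rw [hval, pvSpec]
    simp

theorem pvSpec_length (xs : List String) : ∀ (l p : List String), (pvSpec xs p l).length = l.length := by
  intro l
  induction l with
  | nil => intro p; simp [pvSpec]
  | cons s t ih => intro p; simp [pvSpec, ih]

theorem pvSpec_getElem (xs : List String) : ∀ (l p : List String), xs = p ++ l →
    ∀ (i : Nat) (h : i < l.length),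
      (pvSpec xs p l)[i]'(by rw [pvSpec_length]; exact h) = pvF xs (p.length + i) := by
  intro l
  induction l with
  | nil => intro p _ i h; simp at h
  | cons s t ih =>
    intro p hxs i h
    have hget : xs.getD (p.length) "" = s := by
      rw [hxs]
      simp [List.getD]
    cases i with
    | zero =>
      show (if List.count s xs = 1 then s
            else s ++ "." ++ PySem.Int.toStr ((List.count s p : Int) + 1)) = pvF xs (p.length + 0)
      rw [pvF]
      simp only [Nat.add_zero, hget]
      rw [pvTake_prefix xs p t s hxs]
      by_cases hc : List.count s xs = 1
      · simp [hc]
      · simp [hc, List.count_append]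
    | succ j =>
      have hj : j < t.length := by simpa using h
      have := ih (p ++ [s]) (by simpa using hxs) j hj
      show (pvSpec xs (p ++ [s]) t)[j]'(by rw [pvSpec_length]; exact hj) = pvF xs (p.length + (j + 1))
      rw [this]
      congr 1
      simp only [List.length_append, List.length_cons, List.length_nil]
      omega

-- ===== B-side: the grouping dict =====

-- positions of name in xs, as Ints, offset s (what the dict stores per key)
def pvPos (xs : List String) (name : String) (s : Int) : List Int :=
  ((PySem.List.enumerate xs s).filter (fun p => p.2 == name)).map (·.1)

theorem pvPos_nil (name : String) (s : Int) : pvPos [] name s = [] := rfl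

theorem pvPos_cons (a : String) (t : List String) (name : String) (s : Int) :
    pvPos (a :: t) name s = (if a = name then [s] else []) ++ pvPos t name (s + 1) := by
  rw [pvPos, PySem.List.enumerate_cons]
  by_cases h : a = name <;> simp [h, pvPos]

theorem pvPos_length (name : String) : ∀ (t : List String) (s : Int),
    (pvPos t name s).length = t.count name := by
  intro t
  induction t with
  | nil => intro s; simp [pvPos_nil]
  | cons a l ih =>
    intro s
    rw [pvPos_cons]
    by_cases h : a = name <;> simp [h, ih]

-- the dict built by the first loop: getD
theorem pvDict_getD (xs : List String) (c : String) :
    ((PySem.List.enumerate xs 0).foldl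
      (fun d p => d.modify p.2 [] (fun l => l ++ [p.1])) PySem.Dict.empty).getD c [] = pvPos xs c 0 := by
  have hswap : (PySem.List.enumerate xs 0).foldl
      (fun d p => d.modify p.2 [] (fun l => l ++ [p.1])) PySem.Dict.empty
      = ((PySem.List.enumerate xs 0).map (fun p => (p.2, p.1))).foldl
        (fun d p => d.modify p.1 [] (fun l => l ++ [p.2])) PySem.Dict.empty := by
    rw [List.foldl_map]
  rw [hswap, PySem.Dict.getD_foldl_modify_append]
  simp [pvPos, List.filter_map, List.map_map, Function.comp_def]

-- the dict's keys and items
theorem pvDict_items (xs : List String) :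
    ((PySem.List.enumerate xs 0).foldl
      (fun d p => d.modify p.2 [] (fun l => l ++ [p.1])) PySem.Dict.empty).items
    = (PySem.Set.ofList xs).map (fun name => (name, pvPos xs name 0)) := by
  have hkeys : ((PySem.List.enumerate xs 0).foldl
      (fun d p => d.modify p.2 [] (fun l => l ++ [p.1])) PySem.Dict.empty).keys
      = PySem.Set.ofList xs := by
    rw [PySem.Dict.keys_foldl_modify_key]
    simp [PySem.List.map_snd_enumerate, PySem.Set.update_nil_left]
  have hnd : ((PySem.List.enumerate xs 0).foldl
      (fun d p => d.modify p.2 [] (fun l => l ++ [p.1])) PySem.Dict.empty).keys.Nodup := by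
    rw [hkeys]; exact PySem.Set.nodup_ofList xs
  rw [PySem.Dict.items_eq_map_keys _ hnd []]
  rw [hkeys]
  exact List.map_congr_left (fun name _ => by rw [pvDict_getD])

-- ===== B-side: the scatter =====

-- one group's inner loop: sets exactly the positions of `name`, each to its occurrence label
theorem pvInner (name : String) : ∀ (t : List String) (s k : Nat) (r : List String),
    ((PySem.List.enumerate (pvPos t name (s : Int)) ((k : Nat) : Int)).foldl
      (fun r w => r.set w.2.toNat (name ++ "." ++ PySem.Int.toStr w.1)) r).length = r.length ∧
    ∀ (i : Nat), i < r.length →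
      ((PySem.List.enumerate (pvPos t name (s : Int)) ((k : Nat) : Int)).foldl
        (fun r w => r.set w.2.toNat (name ++ "." ++ PySem.Int.toStr w.1)) r).getD i ""
      = if s ≤ i ∧ i - s < t.length ∧ t.getD (i - s) "" = name
        then name ++ "." ++ PySem.Int.toStr (((k + (t.take (i - s)).count name : Nat) : Int))
        else r.getD i "" := by
  intro t
  induction t with
  | nil =>
    intro s k r
    refine ⟨by simp [pvPos_nil, PySem.List.enumerate_nil], ?_⟩
    intro i hi
    simp [pvPos_nil, PySem.List.enumerate_nil]
  | cons a t ih =>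
    intro s k r
    by_cases ha : a = name
    · -- head is an occurrence: set position s, recurse at s+1 with counter k+1
      have hrw : pvPos (a :: t) name (s : Int) = ((s : Nat) : Int) :: pvPos t name (((s + 1 : Nat) : Nat) : Int) := by
        rw [pvPos_cons]
        simp [ha]
      rw [hrw, PySem.List.enumerate_cons]
      simp only [List.foldl_cons]
      have hk1 : ((k : Nat) : Int) + 1 = (((k + 1 : Nat) : Nat) : Int) := by push_cast; ring
      rw [hk1]
      have hIH := ih (s + 1) (k + 1) (r.set ((s : Int)).toNat (name ++ "." ++ PySem.Int.toStr ((k : Nat) : Int)))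
      have hlset : (r.set ((s : Int)).toNat (name ++ "." ++ PySem.Int.toStr ((k : Nat) : Int))).length = r.length := by
        simp
      refine ⟨by rw [hIH.1, hlset], ?_⟩
      intro i hi
      rw [hIH.2 i (by rw [hlset]; exact hi)]
      have hsnat : ((s : Int)).toNat = s := by simp
      by_cases h1 : i = s
      · have hc1 : ¬ (s + 1 ≤ i ∧ i - (s + 1) < t.length ∧ t.getD (i - (s + 1)) "" = name) := by
          intro hcc; omega
        rw [if_neg hc1]
        have hc2 : s ≤ i ∧ i - s < (a :: t).length ∧ (a :: t).getD (i - s) "" = name := by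
          refine ⟨by omega, by simp; omega, by simp [h1, ha]⟩
        rw [if_pos hc2]
        have : i - s = 0 := by omega
        rw [this]
        have : List.getD (r.set ((s : Int)).toNat (name ++ "." ++ PySem.Int.toStr ((k : Nat) : Int))) i "" = name ++ "." ++ PySem.Int.toStr ((k : Nat) : Int) := by
          rw [hsnat, h1]
          rw [List.getD_eq_getElem?_getD]
          rw [List.getElem?_set_self (by omega)]
          simp
        rw [this]
        simp
      · by_cases h2 : s ≤ i
        · -- i > s: shift indices by one
          have hs1 : s + 1 ≤ i := by omega
          have hcond : (s + 1 ≤ i ∧ i - (s + 1) < t.length ∧ t.getD (i - (s + 1)) "" = name)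
              ↔ (s ≤ i ∧ i - s < (a :: t).length ∧ (a :: t).getD (i - s) "" = name) := by
            constructor
            · rintro ⟨hx, hy, hz⟩
              refine ⟨by omega, by simp; omega, ?_⟩
              have : i - s = (i - (s + 1)) + 1 := by omega
              rw [this]; simpa using hz
            · rintro ⟨hx, hy, hz⟩
              have hde : i - s = (i - (s + 1)) + 1 := by omega
              refine ⟨hs1, by simp at hy; omega, ?_⟩
              rw [hde] at hz; simpa using hz
          have hset : List.getD (r.set ((s : Int)).toNat (name ++ "." ++ PySem.Int.toStr ((k : Nat) : Int))) i "" = r.getD i "" := by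
            rw [hsnat]
            rw [List.getD_eq_getElem?_getD, List.getD_eq_getElem?_getD, List.getElem?_set_ne (by omega)]
          by_cases hc : s + 1 ≤ i ∧ i - (s + 1) < t.length ∧ t.getD (i - (s + 1)) "" = name
          · rw [if_pos hc, if_pos (hcond.mp hc)]
            have hde : i - s = (i - (s + 1)) + 1 := by omega
            rw [hde]
            have htake : (a :: t).take ((i - (s + 1)) + 1) = a :: t.take (i - (s + 1)) := by simp
            rw [htake]
            simp [ha]
            congr 1
            ring
          · rw [if_neg hc, if_neg (fun hx => hc (hcond.mpr hx)), hset]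
        · -- i < s: untouched
          have hc1 : ¬ (s + 1 ≤ i ∧ i - (s + 1) < t.length ∧ t.getD (i - (s + 1)) "" = name) := by
            intro hcc; omega
          have hc2 : ¬ (s ≤ i ∧ i - s < (a :: t).length ∧ (a :: t).getD (i - s) "" = name) := by
            intro hcc; omega
          rw [if_neg hc1, if_neg hc2]
          rw [hsnat]
          rw [List.getD_eq_getElem?_getD, List.getD_eq_getElem?_getD, List.getElem?_set_ne (by omega)]
    · -- head is not an occurrence: nothing written here
      have hrw : pvPos (a :: t) name (s : Int) = pvPos t name (((s + 1 : Nat) : Nat) : Int) := by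
        rw [pvPos_cons]
        simp [ha]
      rw [hrw]
      have hIH := ih (s + 1) k r
      refine ⟨hIH.1, ?_⟩
      intro i hi
      rw [hIH.2 i hi]
      by_cases h2 : s ≤ i
      · by_cases h1 : i = s
        · have hc1 : ¬ (s + 1 ≤ i ∧ i - (s + 1) < t.length ∧ t.getD (i - (s + 1)) "" = name) := by
            intro hcc; omega
          have hc2 : ¬ (s ≤ i ∧ i - s < (a :: t).length ∧ (a :: t).getD (i - s) "" = name) := by
            rintro ⟨hx, hy, hz⟩
            have : i - s = 0 := by omega
            rw [this] at hz; simp at hz; exact ha hz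
          rw [if_neg hc1, if_neg hc2]
        · have hcond : (s + 1 ≤ i ∧ i - (s + 1) < t.length ∧ t.getD (i - (s + 1)) "" = name)
              ↔ (s ≤ i ∧ i - s < (a :: t).length ∧ (a :: t).getD (i - s) "" = name) := by
            constructor
            · rintro ⟨hx, hy, hz⟩
              refine ⟨by omega, by simp; omega, ?_⟩
              have : i - s = (i - (s + 1)) + 1 := by omega
              rw [this]; simpa using hz
            · rintro ⟨hx, hy, hz⟩
              refine ⟨by omega, by simp at hy; omega, ?_⟩
              have : i - s = (i - (s + 1)) + 1 := by omega
              rw [this] at hz; simpa using hz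
          by_cases hc : s + 1 ≤ i ∧ i - (s + 1) < t.length ∧ t.getD (i - (s + 1)) "" = name
          · rw [if_pos hc, if_pos (hcond.mp hc)]
            have hde : i - s = (i - (s + 1)) + 1 := by omega
            rw [hde]
            have htake : (a :: t).take ((i - (s + 1)) + 1) = a :: t.take (i - (s + 1)) := by simp
            rw [htake]
            simp [ha]
          · rw [if_neg hc, if_neg (fun hx => hc (hcond.mpr hx))]
      · have hc1 : ¬ (s + 1 ≤ i ∧ i - (s + 1) < t.length ∧ t.getD (i - (s + 1)) "" = name) := by
          intro hcc; omega
        have hc2 : ¬ (s ≤ i ∧ i - s < (a :: t).length ∧ (a :: t).getD (i - s) "" = name) := by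
          intro hcc; omega
        rw [if_neg hc1, if_neg hc2]

-- the outer fold over the grouped items, with the processed-names invariant
theorem pvOuter (xs : List String) : ∀ (ns : List String) (r : List String), ns.Nodup →
    r.length = xs.length →
    (∀ (i : Nat), i < xs.length → r.getD i "" = if xs.getD i "" ∈ ns then xs.getD i "" else pvF xs i) →
    ((ns.map (fun name => (name, pvPos xs name 0))).foldl
      (fun result q =>
        if 1 < q.2.length then
          (PySem.List.enumerate q.2 1).foldl
            (fun r w => r.set w.2.toNat (q.1 ++ "." ++ PySem.Int.toStr w.1)) result
        else result) r).length = xs.length ∧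
    ∀ (i : Nat), i < xs.length →
      ((ns.map (fun name => (name, pvPos xs name 0))).foldl
        (fun result q =>
          if 1 < q.2.length then
            (PySem.List.enumerate q.2 1).foldl
              (fun r w => r.set w.2.toNat (q.1 ++ "." ++ PySem.Int.toStr w.1)) result
          else result) r).getD i "" = pvF xs i := by
  intro ns
  induction ns with
  | nil =>
    intro r _ hlen hinv
    refine ⟨by simpa using hlen, ?_⟩
    intro i hi
    have := hinv i hi
    simpa using this
  | cons name rest ih =>
    intro r hnd hlen hinv
    obtain ⟨hnm, hndr⟩ := List.nodup_cons.mp hnd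
    simp only [List.map_cons, List.foldl_cons]
    have hz : (0 : Int) = ((0 : Nat) : Int) := by simp
    have ho : (1 : Int) = ((1 : Nat) : Int) := by simp
    by_cases hlt : 1 < (pvPos xs name 0).length
    · rw [if_pos hlt]
      have hcnt : 1 < xs.count name := by rw [← pvPos_length name xs 0]; exact hlt
      have hI := pvInner name xs 0 1 r
      rw [hz, ho] at *
      set r1 := (PySem.List.enumerate (pvPos xs name ((0 : Nat) : Int)) ((1 : Nat) : Int)).foldl
        (fun r w => r.set w.2.toNat (name ++ "." ++ PySem.Int.toStr w.1)) r with hr1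
      have hlen1 : r1.length = xs.length := by rw [← hlen, hr1]; exact hI.1
      have hinv1 : ∀ (i : Nat), i < xs.length →
          r1.getD i "" = if xs.getD i "" ∈ rest then xs.getD i "" else pvF xs i := by
        intro i hi
        rw [hr1, hI.2 i (by omega)]
        by_cases hn : xs.getD i "" = name
        · have hc : 0 ≤ i ∧ i - 0 < xs.length ∧ xs.getD (i - 0) "" = name := by
            exact ⟨Nat.zero_le i, by simpa using hi, by simpa using hn⟩
          rw [if_pos hc]
          have hmemr : xs.getD i "" ∉ rest := by rw [hn]; exact hnm
          rw [if_neg hmemr]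
          have hne1 : List.count (xs.getD i "") xs ≠ 1 := by
            rw [hn]
            omega
          rw [pvF, if_neg hne1, hn]
          have hsome : xs[i]? = some name := by
            rw [List.getElem?_eq_getElem hi]
            refine congrArg some ?_
            rw [← hn, List.getD_eq_getElem?_getD, List.getElem?_eq_getElem hi]
            simp
          have htk : List.count name (xs.take (i + 1)) = List.count name (xs.take i) + 1 := by
            rw [List.take_add_one, hsome]
            simp [List.count_append]
          rw [htk]
          simp only [Nat.sub_zero]
          congr 2
          push_cast
          ring
        · have hc : ¬ (0 ≤ i ∧ i - 0 < xs.length ∧ xs.getD (i - 0) "" = name) := by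
            intro hcc
            exact hn (by simpa using hcc.2.2)
          have hmemiff : (xs.getD i "" ∈ name :: rest) ↔ (xs.getD i "" ∈ rest) := by
            constructor
            · intro h
              rcases List.mem_cons.mp h with h' | h'
              · exact absurd h' hn
              · exact h'
            · exact fun h => List.mem_cons.mpr (Or.inr h)
          rw [if_neg hc, hinv i hi, if_congr hmemiff rfl rfl]
      exact ih r1 hndr hlen1 hinv1
    · rw [if_neg hlt]
      have hcnt : xs.count name ≤ 1 := by
        rw [← pvPos_length name xs 0]
        omega
      have hinv1 : ∀ (i : Nat), i < xs.length →
          r.getD i "" = if xs.getD i "" ∈ rest then xs.getD i "" else pvF xs i := by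
        intro i hi
        rw [hinv i hi]
        by_cases hn : xs.getD i "" = name
        · have hmem : xs.getD i "" ∈ name :: rest := by rw [hn]; exact List.mem_cons_self
          rw [if_pos hmem]
          have hmemr : xs.getD i "" ∉ rest := by rw [hn]; exact hnm
          rw [if_neg hmemr]
          have hxm : xs.getD i "" ∈ xs := by
            rw [List.getD_eq_getElem?_getD, List.getElem?_eq_getElem hi]
            simp
          have h1 : List.count (xs.getD i "") xs = 1 := by
            have := List.count_pos_iff.mpr hxm
            rw [hn] at this ⊢
            omega
          rw [pvF, if_pos h1]
        · have hmemiff : (xs.getD i "" ∈ name :: rest) ↔ (xs.getD i "" ∈ rest) := by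
            constructor
            · intro h
              rcases List.mem_cons.mp h with h' | h'
              · exact absurd h' hn
              · exact h'
            · exact fun h => List.mem_cons.mpr (Or.inr h)
          rw [if_congr hmemiff rfl rfl]
      exact ih r hndr hlen hinv1

-- B's port equals the target map
theorem pvB (xs : List String) : rename_sequences_otb_alt xs = (List.range xs.length).map (pvF xs) := by
  unfold rename_sequences_otb_alt
  simp only []
  rw [pvDict_items]
  have hO := pvOuter xs (PySem.Set.ofList xs) xs (PySem.Set.nodup_ofList xs) rfl
    (by
      intro i hi
      have hxm : xs.getD i "" ∈ xs := by
        rw [List.getD_eq_getElem?_getD, List.getElem?_eq_getElem hi]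
        simp
      rw [if_pos ((PySem.Set.mem_ofList _ _).mpr hxm)])
  apply List.ext_getElem
  · rw [hO.1]; simp
  · intro i h1 h2
    have hi : i < xs.length := by rw [← hO.1]; exact h1
    have := hO.2 i hi
    rw [List.getD_eq_getElem?_getD, List.getElem?_eq_getElem h1] at this
    simp at this
    rw [this]
    simp

-- A's port equals the target map
theorem pvAmap (xs : List String) : rename_sequences_otb xs = (List.range xs.length).map (pvF xs) := by
  have hA := pvA xs xs [] [] (by simp)
  have : rename_sequences_otb xs = pvSpec xs [] xs := by
    rw [rename_sequences_otb]
    exact hA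
  rw [this]
  apply List.ext_getElem
  · rw [pvSpec_length]; simp
  · intro i h1 h2
    have hi : i < xs.length := by rw [← pvSpec_length xs xs []]; exact h1
    have := pvSpec_getElem xs xs [] (by simp) i (by simpa [pvSpec_length] using h1)
    simp only [List.length_nil, Nat.zero_add] at this
    rw [this]
    simp

-- ===== VERDICT (by name: the statement is the Claim_ definition above) =====
theorem rename_sequences_otb_spec : Claim_equal_rename_sequences_otb := by
  intro seq_names _
  show rename_sequences_otb seq_names = rename_sequences_otb_alt seq_names
  rw [pvAmap, pvB]
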